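-- pv_equiv track=rewrite | github.com/coffeebearchen/video_agent2 | image_engine.py | build_char_styles
-- ===== SOURCE A (Python) =====
-- from typing import List, Tuple
--
-- def build_char_styles(text: str, highlights: List[str]) -> List[Tuple[str, bool]]:
--     """
--     将文本拆成 (字符, 是否高亮)。
--     重点词优先匹配长词，避免重叠混乱。
--     """
--     if not text:
--         return []
--
--     if not highlights:
--         return [(ch, False) for ch in text]
--
--     highlights = sorted(highlights, key=len, reverse=True)
--     styles = [False] * len(text)
--
--     for word in highlights:
--         start = 0
--         while True:
--             idx = text.find(word, start)
--             if idx == -1: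
--                 break
--             for i in range(idx, idx + len(word)):
--                 if 0 <= i < len(styles):
--                     styles[i] = True
--             start = idx + len(word)
--
--     return [(text[i], styles[i]) for i in range(len(text))]
-- ===== SOURCE B (Python) =====
-- def build_char_styles(text, highlights):
--     n = len(text)
--     styles = [False] * n
--     nxt = [0] * len(highlights)
--     for i in range(n):
--         for k, word in enumerate(highlights):
--             if nxt[k] <= i and text.startswith(word, i):
--                 for j in range(i, i + len(word)):
--                     styles[j] = True
--                 nxt[k] = i + len(word)
--     return [(text[i], styles[i]) for i in range(n)]
-- ===== Notes on version B (the rewrite author's own statement) =====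
-- stated objective: alternative
-- what changed: A makes a separate repeated-str.find pass over the text for every highlight word (after sorting them by length); B drops the sort and makes a single left-to-right sweep over the text positions, keeping a next-allowed-start cursor per word to reproduce the same greedy non-overlapping matching.
import Mathlib
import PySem

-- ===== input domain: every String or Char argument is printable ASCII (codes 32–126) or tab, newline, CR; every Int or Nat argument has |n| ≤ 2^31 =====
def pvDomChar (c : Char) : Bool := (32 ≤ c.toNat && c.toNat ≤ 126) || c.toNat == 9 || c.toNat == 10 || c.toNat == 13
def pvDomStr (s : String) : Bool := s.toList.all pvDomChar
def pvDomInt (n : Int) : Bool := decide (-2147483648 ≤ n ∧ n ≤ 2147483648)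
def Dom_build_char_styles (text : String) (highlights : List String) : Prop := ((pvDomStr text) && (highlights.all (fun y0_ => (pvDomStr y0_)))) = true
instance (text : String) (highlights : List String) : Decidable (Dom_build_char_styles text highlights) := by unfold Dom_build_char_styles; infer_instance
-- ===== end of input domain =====

-- B replaces A's per-word repeated str.find passes over a sorted copy of the highlight list by a single
-- left-to-right sweep over the text positions that tests every pattern at the current position
-- (objective: alternative traversal, same results; not claimed faster).

-- ===== PORT A =====
-- 'for i in range(idx, idx + len(word)): if 0 <= i < len(styles): styles[i] = True'
def pvMarkGuard (styles : List Bool) (a b : Int) : List Bool :=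
  (PySem.List.pyRange a b 1).foldl
    (fun st i => if 0 ≤ i ∧ i < (st.length : Int) then st.set i.toNat true else st) styles

-- 'start = 0 / while True: idx = text.find(word, start); if idx == -1: break; mark; start = idx + len(word)'
-- fuel only makes the loop total: under Pre_ every word is nonempty (if text is), start grows by
-- len(word) ≥ 1 per round and stays ≤ len(text), so fuel len(text)+2 is never exhausted.
def pvFindLoop (t w : List Char) : Nat → Int → List Bool → List Bool
  | 0, _, styles => styles
  | fuel+1, start, styles =>
    let idx := PySem.Chars.findFrom t w start
    if idx = -1 then styles
    else pvFindLoop t w fuel (idx + (w.length : Int)) (pvMarkGuard styles idx (idx + (w.length : Int)))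

def build_char_styles (text : String) (highlights : List String) : List (String × Bool) :=
  let t := text.toList
  if t = [] then []
  else if highlights = [] then t.map (fun c => (String.ofList [c], false))
  else
    let hs := PySem.List.sorted highlights (fun w => PySem.Str.len w) true
    let styles := hs.foldl (fun st w => pvFindLoop t w.toList (t.length + 2) 0 st)
        (List.replicate t.length false)
    (List.range t.length).map (fun i => (String.ofList [t.getD i ' '], styles.getD i false))

-- ===== PORT B =====
-- one (word, nxt) state entry examined at sweep position i; acc = (styles so far, rebuilt state list).
-- 'text.startswith(word, i)' for 0 ≤ i ≤ len(text) is exactly word.toList <+: t.drop i (hand port; exact).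
def pvBStep (t : List Char) (i : Nat) (acc : List Bool × List (String × Nat)) (e : String × Nat) :
    List Bool × List (String × Nat) :=
  let w := e.1.toList
  if e.2 ≤ i ∧ w.isPrefixOf (t.drop i) then
    ((List.range' i w.length).foldl (fun s j => s.set j true) acc.1, acc.2 ++ [(e.1, i + w.length)])
  else (acc.1, acc.2 ++ [e])

def build_char_styles_alt (text : String) (highlights : List String) : List (String × Bool) :=
  let t := text.toList
  let n := t.length
  let fin := (List.range n).foldl (fun st i => st.2.foldl (pvBStep t i) (st.1, []))
      (List.replicate n false, highlights.map (fun w => (w, 0)))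
  (List.range n).map (fun i => (String.ofList [t.getD i ' '], fin.1.getD i false))

-- ===== PRECONDITION & SPEC =====
-- Pre_ excludes only inputs on which A does not return: with a nonempty text and '' among the
-- highlights, A's 'text.find("", start)' returns start forever and the while-loop never terminates.
def Pre_build_char_styles (text : String) (highlights : List String) : Prop :=
  text.toList = [] ∨ ∀ w ∈ highlights, w.toList ≠ []
instance (text : String) (highlights : List String) : Decidable (Pre_build_char_styles text highlights) := by unfold Pre_build_char_styles; infer_instance

def pvWitness_build_char_styles : String × List String := ("the cat sat", ["cat", "at", "dog"])

def Spec_build_char_styles (text : String) (highlights : List String) (out : List (String × Bool)) : Prop := out = build_char_styles_alt text highlights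
instance (text : String) (highlights : List String) (out : List (String × Bool)) : Decidable (Spec_build_char_styles text highlights out) := by unfold Spec_build_char_styles; infer_instance

-- ===== CLAIM (what is proved, stated in full; the proofs are below) =====
def Claim_equal_build_char_styles : Prop := ∀ (text : String) (highlights : List String), Dom_build_char_styles text highlights → Pre_build_char_styles text highlights → Spec_build_char_styles text highlights (build_char_styles text highlights)

-- ===== LEMMAS AND PROOFS =====



-- greedy non-overlapping match starts of pattern w in t from position s (the reference both ports meet)
def pvGS (t w : List Char) (s : Nat) : List Nat :=
  if h : w ≠ [] ∧ s + w.length ≤ t.length then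
    if w.isPrefixOf (t.drop s) then s :: pvGS t w (s + w.length) else pvGS t w (s + 1)
  else []
termination_by t.length - s
decreasing_by
  · have := List.length_pos_of_ne_nil h.1; omega
  · have := List.length_pos_of_ne_nil h.1; omega

-- position j is covered by some greedy match of some highlight word
def pvCovB (t : List Char) (ws : List String) (j : Nat) : Bool :=
  ws.any (fun w => (pvGS t w.toList 0).any (fun q => decide (q ≤ j) && decide (j < q + w.toList.length)))

-- matches already recorded by B's sweep after positions < i have been processed
def pvPart (t : List Char) (ws : List String) (i j : Nat) : Bool :=
  ws.any (fun w => (pvGS t w.toList 0).any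
    (fun q => decide (q < i) && decide (q ≤ j) && decide (j < q + w.toList.length)))

-- B's per-word state invariant at sweep position i
def pvRel (t : List Char) (i : Nat) (e : String × Nat) : Prop :=
  pvGS t e.1.toList (max i e.2) = (pvGS t e.1.toList 0).filter (fun q => decide (i ≤ q))

-- helper defs/lemmas for the proofs

lemma pvInfix_of_prefix_drop {t w : List Char} {s q : Nat} (hq : s ≤ q) (hp : w <+: t.drop q) :
    w <:+: t.drop s := by
  rw [← PySem.Chars.isIn_iff_infix, ← PySem.Chars.exists_prefix_drop_iff_isIn]
  exact ⟨q - s, by rw [List.drop_drop, Nat.add_sub_cancel' hq]; exact hp⟩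

lemma pvGS_mem {t w : List Char} {s q : Nat} (h : q ∈ pvGS t w s) :
    s ≤ q ∧ w <+: t.drop q ∧ q + w.length ≤ t.length := by
  suffices H : ∀ k s, t.length + 1 - s ≤ k → q ∈ pvGS t w s →
      s ≤ q ∧ w <+: t.drop q ∧ q + w.length ≤ t.length from H (t.length + 1) s (by omega) h
  intro k
  induction k with
  | zero =>
    intro s hs hq
    rw [pvGS, dif_neg (by intro hg; omega)] at hq
    simp at hq
  | succ k ih =>
    intro s hs hq
    rw [pvGS] at hq
    by_cases hg : w ≠ [] ∧ s + w.length ≤ t.length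
    · have hwpos : 0 < w.length := List.length_pos_of_ne_nil hg.1
      rw [dif_pos hg] at hq
      by_cases hp : w.isPrefixOf (t.drop s)
      · rw [if_pos hp] at hq
        rcases List.mem_cons.mp hq with rfl | hq'
        · exact ⟨le_rfl, List.isPrefixOf_iff_prefix.mp hp, hg.2⟩
        · have h2 := ih (s + w.length) (by omega) hq'
          exact ⟨by omega, h2.2⟩
      · rw [if_neg hp] at hq
        have h2 := ih (s + 1) (by omega) hq
        exact ⟨by omega, h2.2⟩
    · rw [dif_neg hg] at hq
      simp at hq

lemma pvGS_nil {t w : List Char} {s : Nat} (h : ∀ q, s ≤ q → ¬ w <+: t.drop q) :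
    pvGS t w s = [] := by
  rw [List.eq_nil_iff_forall_not_mem]
  intro q hq
  obtain ⟨h1, h2, _⟩ := pvGS_mem hq
  exact h q h1 h2

lemma pvGS_first {t w : List Char} {s q0 : Nat} (hw : w ≠ []) (hs : s ≤ q0)
    (hp : w <+: t.drop q0) (hmin : ∀ i, s ≤ i → i < q0 → ¬ w <+: t.drop i) :
    pvGS t w s = q0 :: pvGS t w (q0 + w.length) := by
  have hwpos : 0 < w.length := List.length_pos_of_ne_nil hw
  have hq0n : q0 + w.length ≤ t.length := by
    by_cases hq : q0 ≤ t.length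
    · have := hp.length_le; rw [List.length_drop] at this; omega
    · exfalso
      have hd : t.drop q0 = [] := List.drop_eq_nil_of_le (by omega)
      rw [hd, List.prefix_nil] at hp
      exact hw hp
  suffices H : ∀ c s, q0 - s ≤ c → s ≤ q0 → (∀ i, s ≤ i → i < q0 → ¬ w <+: t.drop i) →
      pvGS t w s = q0 :: pvGS t w (q0 + w.length) from H q0 s (by omega) hs hmin
  intro c
  induction c with
  | zero =>
    intro s hc hs' _
    have : s = q0 := by omega
    subst this
    rw [pvGS, dif_pos ⟨hw, by omega⟩, if_pos (List.isPrefixOf_iff_prefix.mpr hp)]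
  | succ c ih =>
    intro s hc hs' hmin'
    by_cases hsq : s = q0
    · subst hsq
      rw [pvGS, dif_pos ⟨hw, by omega⟩, if_pos (List.isPrefixOf_iff_prefix.mpr hp)]
    · have hlt : s < q0 := by omega
      rw [pvGS, dif_pos ⟨hw, by omega⟩, if_neg (by
        simp only [List.isPrefixOf_iff_prefix]
        exact hmin' s le_rfl hlt)]
      exact ih (s + 1) (by omega) (by omega) (fun i h1 h2 => hmin' i (by omega) h2)

lemma pvMark_length (m : Nat) : ∀ (st : List Bool) (a : Nat),
    ((List.range' a m).foldl (fun s j => s.set j true) st).length = st.length := by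
  induction m with
  | zero => intro st a; rfl
  | succ m ih =>
    intro st a
    rw [List.range'_succ, List.foldl_cons, ih, List.length_set]

lemma pvMark_getD (m : Nat) : ∀ (st : List Bool) (a j : Nat),
    ((List.range' a m).foldl (fun s j => s.set j true) st).getD j false
      = (st.getD j false || (decide (a ≤ j) && decide (j < a + m) && decide (j < st.length))) := by
  induction m with
  | zero => intro st a j; simp
  | succ m ih =>
    intro st a j
    rw [List.range'_succ, List.foldl_cons, ih]
    simp only [List.getD_eq_getElem?_getD, List.getElem?_set, List.length_set]
    by_cases haj : a = j
    · subst haj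
      by_cases hl : a < st.length
      · have h1 : a < a + (m + 1) := by omega
        simp [hl, h1]
      · have h1 : ¬ (a + 1 ≤ a) := by omega
        simp [hl, h1]
    · have e1 : decide (a + 1 ≤ j) = decide (a ≤ j) := decide_eq_decide.mpr (by omega)
      have e2 : decide (j < a + 1 + m) = decide (j < a + (m + 1)) := decide_eq_decide.mpr (by omega)
      simp only [if_neg haj, e1, e2]

lemma pvMarkGuard_eq (m : Nat) : ∀ (st : List Bool) (a : Nat),
    pvMarkGuard st (a : Int) ((a : Int) + (m : Int))
      = (List.range' a m).foldl (fun s j => s.set j true) st := by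
  induction m with
  | zero =>
    intro st a
    unfold pvMarkGuard
    rw [PySem.List.pyRange_one_eq_nil (by push_cast; omega)]
    rfl
  | succ m ih =>
    intro st a
    unfold pvMarkGuard
    rw [PySem.List.pyRange_one_cons (by push_cast; omega), List.foldl_cons]
    have hstep : (if (0:Int) ≤ (a : Int) ∧ (a : Int) < (st.length : Int)
          then st.set ((a : Int)).toNat true else st) = st.set a true := by
      by_cases hl : a < st.length
      · rw [if_pos ⟨Int.natCast_nonneg a, by exact_mod_cast hl⟩, Int.toNat_natCast]
      · rw [if_neg (by
            rintro ⟨_, h2⟩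
            exact hl (by exact_mod_cast h2)),
          List.set_eq_of_length_le (by omega)]
    rw [hstep]
    have e1 : (a : Int) + 1 = ((a + 1 : Nat) : Int) := by push_cast; ring
    have e2 : (a : Int) + ((m + 1 : Nat) : Int) = ((a + 1 : Nat) : Int) + (m : Int) := by
      push_cast; ring
    rw [e1, e2, List.range'_succ, List.foldl_cons]
    exact ih (st.set a true) (a + 1)

lemma pvMarkGuard_length (st : List Bool) (a b : Int) :
    (pvMarkGuard st a b).length = st.length := by
  unfold pvMarkGuard
  generalize PySem.List.pyRange a b 1 = r
  induction r generalizing st with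
  | nil => rfl
  | cons x r ih =>
    rw [List.foldl_cons, ih]
    split <;> simp

lemma pvFindLoop_length (t w : List Char) : ∀ (fuel : Nat) (start : Int) (st : List Bool),
    (pvFindLoop t w fuel start st).length = st.length := by
  intro fuel
  induction fuel with
  | zero => intro start st; rfl
  | succ fuel ih =>
    intro start st
    simp only [pvFindLoop]
    split
    · rfl
    · rw [ih, pvMarkGuard_length]

lemma pvFindLoop_getD (t w : List Char) (hw : w ≠ []) (j : Nat) :
    ∀ (fuel : Nat) (s : Nat) (st : List Bool), s ≤ t.length → st.length = t.length →
      t.length + 1 - s ≤ fuel →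
      (pvFindLoop t w fuel (s : Int) st).getD j false
        = (st.getD j false ||
            (pvGS t w s).any (fun q => decide (q ≤ j) && decide (j < q + w.length))) := by
  have hwpos : 0 < w.length := List.length_pos_of_ne_nil hw
  intro fuel
  induction fuel with
  | zero =>
    intro s st hs hlen hf
    exact absurd hf (by omega)
  | succ fuel ih =>
    intro s st hs hlen hf
    simp only [pvFindLoop]
    by_cases hidx : PySem.Chars.findFrom t w (s : Int) = -1
    · rw [if_pos hidx]
      have hno : ¬ w <:+: t.drop s := (PySem.Chars.findFrom_natCast_eq_neg_one_iff t w s hs).mp hidx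
      have hgs : pvGS t w s = [] :=
        pvGS_nil (fun q hq hp => hno (pvInfix_of_prefix_drop hq hp))
      rw [hgs]
      simp
    · rw [if_neg hidx]
      have hspec := PySem.Chars.findFrom_natCast_spec t w s hs hidx
      have hnn : (0 : Int) ≤ PySem.Chars.findFrom t w (s : Int) :=
        le_trans (Int.natCast_nonneg s) hspec.1
      set q0 := (PySem.Chars.findFrom t w (s : Int)).toNat with hq0
      have hcast : PySem.Chars.findFrom t w (s : Int) = (q0 : Int) :=
        (Int.toNat_of_nonneg hnn).symm
      have hsq0 : s ≤ q0 := by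
        have := hspec.1
        rw [hcast] at this
        exact_mod_cast this
      have hp : w <+: t.drop q0 := hspec.2.1
      have hmin : ∀ i, s ≤ i → i < q0 → ¬ w <+: t.drop i := hspec.2.2
      have hq0n : q0 + w.length ≤ t.length := by
        by_cases hq : q0 ≤ t.length
        · have := hp.length_le; rw [List.length_drop] at this; omega
        · exfalso
          have hd : t.drop q0 = [] := List.drop_eq_nil_of_le (by omega)
          rw [hd, List.prefix_nil] at hp
          exact hw hp
      have hgs : pvGS t w s = q0 :: pvGS t w (q0 + w.length) := pvGS_first hw hsq0 hp hmin
      rw [hcast, pvMarkGuard_eq]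
      have ecast : (q0 : Int) + (w.length : Int) = ((q0 + w.length : Nat) : Int) := by
        push_cast; ring
      rw [ecast]
      rw [ih (q0 + w.length) _ (by omega) (by rw [pvMark_length]; exact hlen) (by omega)]
      rw [pvMark_getD, hgs]
      simp only [List.any_cons]
      have e3 : (decide (q0 ≤ j) && decide (j < q0 + w.length) && decide (j < st.length))
          = (decide (q0 ≤ j) && decide (j < q0 + w.length)) := by
        rw [hlen]
        by_cases h1 : j < q0 + w.length
        · have h2 : j < t.length := by omega
          simp [h1, h2]
        · simp [h1]
      rw [e3, Bool.or_assoc]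

lemma pvAFold_getD (t : List Char) (j : Nat) : ∀ (ws : List String) (st : List Bool),
    (∀ w ∈ ws, w.toList ≠ []) → st.length = t.length →
    ((ws.foldl (fun st w => pvFindLoop t w.toList (t.length + 2) 0 st) st)).getD j false
      = (st.getD j false || pvCovB t ws j) := by
  intro ws
  induction ws with
  | nil => intro st _ _; simp [pvCovB]
  | cons w ws ih =>
    intro st h hlen
    rw [List.foldl_cons]
    rw [ih _ (fun x hx => h x (List.mem_cons_of_mem _ hx)) (by rw [pvFindLoop_length]; exact hlen)]
    have h0 : ((0 : Int)) = ((0 : Nat) : Int) := by norm_num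
    rw [h0, pvFindLoop_getD t w.toList (h w (by simp)) j (t.length + 2) 0 st
      (Nat.zero_le _) hlen (by omega)]
    simp only [pvCovB, List.any_cons]
    rw [Bool.or_assoc]

lemma pvBStep_rel {t : List Char} {i : Nat} (hi : i < t.length) {e : String × Nat}
    (he : pvRel t i e) :
    (¬ (e.2 ≤ i ∧ e.1.toList.isPrefixOf (t.drop i)) → i ∉ pvGS t e.1.toList 0 ∧ pvRel t (i+1) e) ∧
    ((e.2 ≤ i ∧ e.1.toList.isPrefixOf (t.drop i)) →
      (e.1.toList ≠ [] → i ∈ pvGS t e.1.toList 0) ∧ pvRel t (i+1) (e.1, i + e.1.toList.length)) := by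
  obtain ⟨w, p⟩ := e
  unfold pvRel at he
  dsimp only at he ⊢
  have fC : ∀ (R : List Nat), R.filter (fun q => decide (i + 1 ≤ q))
      = (R.filter (fun q => decide (i ≤ q))).filter (fun q => decide (i + 1 ≤ q)) := by
    intro R
    rw [List.filter_filter]
    exact (List.filter_congr (fun x _ => by
      rw [Bool.eq_iff_iff]
      simp only [Bool.and_eq_true, decide_eq_true_eq]
      omega)).symm
  have fGe : ∀ (s' : Nat), i + 1 ≤ s' →
      (pvGS t w.toList s').filter (fun q => decide (i + 1 ≤ q)) = pvGS t w.toList s' := by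
    intro s' hs'
    rw [List.filter_eq_self]
    intro q hq
    have := (pvGS_mem hq).1
    simp only [decide_eq_true_eq]
    omega
  constructor
  · intro hc
    by_cases hpi : p ≤ i
    · have hmax : max i p = i := by omega
      rw [hmax] at he
      have hnp : ¬ w.toList <+: t.drop i := by
        intro hp
        exact hc ⟨hpi, List.isPrefixOf_iff_prefix.mpr hp⟩
      have hiR : i ∉ pvGS t w.toList 0 := by
        intro hiR
        have hmem : i ∈ pvGS t w.toList i := by
          rw [he]
          exact List.mem_filter.mpr ⟨hiR, by simp⟩
        exact hnp (pvGS_mem hmem).2.1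
      refine ⟨hiR, ?_⟩
      unfold pvRel
      dsimp only
      have hmax2 : max (i + 1) p = i + 1 := by omega
      rw [hmax2]
      by_cases hg : w.toList ≠ [] ∧ i + w.toList.length ≤ t.length
      · have hstep : pvGS t w.toList i = pvGS t w.toList (i + 1) := by
          rw [pvGS, dif_pos hg, if_neg (by
            simp only [List.isPrefixOf_iff_prefix]
            exact hnp)]
        calc pvGS t w.toList (i + 1)
            = (pvGS t w.toList (i + 1)).filter (fun q => decide (i + 1 ≤ q)) :=
              (fGe (i + 1) le_rfl).symm
          _ = ((pvGS t w.toList 0).filter (fun q => decide (i ≤ q))).filter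
                (fun q => decide (i + 1 ≤ q)) := by rw [← hstep, he]
          _ = (pvGS t w.toList 0).filter (fun q => decide (i + 1 ≤ q)) := (fC _).symm
      · have h1 : pvGS t w.toList i = [] := by rw [pvGS, dif_neg hg]
        have h2 : pvGS t w.toList (i + 1) = [] := by
          rw [pvGS, dif_neg (by
            intro hg2
            exact hg ⟨hg2.1, by omega⟩)]
        rw [h2, fC, ← he, h1]
        rfl
    · have hmax : max i p = p := by omega
      rw [hmax] at he
      have hiR : i ∉ pvGS t w.toList 0 := by
        intro hiR
        have hmem : i ∈ pvGS t w.toList p := by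
          rw [he]
          exact List.mem_filter.mpr ⟨hiR, by simp⟩
        have := (pvGS_mem hmem).1
        omega
      refine ⟨hiR, ?_⟩
      unfold pvRel
      dsimp only
      have hmax2 : max (i + 1) p = p := by omega
      rw [hmax2, fC, ← he, fGe p (by omega)]
  · rintro ⟨hpi, hpre⟩
    have hp : w.toList <+: t.drop i := List.isPrefixOf_iff_prefix.mp hpre
    have hmax : max i p = i := by omega
    rw [hmax] at he
    by_cases hwl : w.toList = []
    · have hnil : ∀ s', pvGS t w.toList s' = [] := fun s' => by
        rw [pvGS, dif_neg (by simp [hwl])]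
      constructor
      · intro h; exact absurd hwl h
      · unfold pvRel
        dsimp only
        rw [hnil, hnil]
        rfl
    · have hwpos : 0 < w.toList.length := List.length_pos_of_ne_nil hwl
      have hin : i + w.toList.length ≤ t.length := by
        have := hp.length_le; rw [List.length_drop] at this; omega
      have hcons : pvGS t w.toList i = i :: pvGS t w.toList (i + w.toList.length) := by
        rw [pvGS, dif_pos ⟨hwl, hin⟩, if_pos hpre]
      constructor
      · intro _
        have hmem : i ∈ pvGS t w.toList i := by
          rw [hcons]; exact List.mem_cons_self ..
        rw [he] at hmem
        exact List.mem_of_mem_filter hmem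
      · unfold pvRel
        dsimp only
        have hmax2 : max (i + 1) (i + w.toList.length) = i + w.toList.length := by omega
        rw [hmax2]
        have : (pvGS t w.toList 0).filter (fun q => decide (i + 1 ≤ q))
            = pvGS t w.toList (i + w.toList.length) := by
          rw [fC, ← he, hcons, List.filter_cons_of_neg (by simp), fGe _ (by omega)]
        exact this.symm

lemma pvBInner_spec (t : List Char) (i : Nat) (hi : i < t.length) :
    ∀ (es : List (String × Nat)), ∀ (st : List Bool) (out : List (String × Nat)),
      st.length = t.length → (∀ e ∈ es, pvRel t i e) →
      (es.foldl (pvBStep t i) (st, out)).1.length = t.length ∧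
      (∀ j, (es.foldl (pvBStep t i) (st, out)).1.getD j false
        = (st.getD j false || (es.map Prod.fst).any (fun w =>
            decide (i ∈ pvGS t w.toList 0) && decide (i ≤ j) && decide (j < i + w.toList.length)))) ∧
      (∃ es', (es.foldl (pvBStep t i) (st, out)).2 = out ++ es' ∧
        es'.map Prod.fst = es.map Prod.fst ∧ ∀ e ∈ es', pvRel t (i+1) e) := by
  intro es
  induction es with
  | nil =>
    intro st out hlen _
    exact ⟨hlen, fun j => by simp, ⟨[], by simp, rfl, by simp⟩⟩
  | cons e es ih =>
    intro st out hlen hrel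
    rw [List.foldl_cons]
    have hre := pvBStep_rel hi (hrel e (by simp))
    by_cases hc : (e.2 ≤ i ∧ e.1.toList.isPrefixOf (t.drop i))
    · have hstep : pvBStep t i (st, out) e
          = ((List.range' i e.1.toList.length).foldl (fun s j => s.set j true) st,
             out ++ [(e.1, i + e.1.toList.length)]) := by
        unfold pvBStep
        rw [if_pos hc]
      rw [hstep]
      have hlen' : ((List.range' i e.1.toList.length).foldl (fun s j => s.set j true) st).length
          = t.length := by rw [pvMark_length]; exact hlen
      obtain ⟨ih1, ih2, es', hes1, hes2, hes3⟩ :=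
        ih _ _ hlen' (fun x hx => hrel x (by simp [hx]))
      refine ⟨ih1, ?_, ⟨(e.1, i + e.1.toList.length) :: es', by rw [hes1]; simp,
        by simp [hes2], ?_⟩⟩
      · intro j
        rw [ih2 j, pvMark_getD]
        simp only [List.map_cons, List.any_cons]
        have hhit : (decide (i ≤ j) && decide (j < i + e.1.toList.length) && decide (j < st.length))
            = (decide (i ∈ pvGS t e.1.toList 0) && decide (i ≤ j)
                && decide (j < i + e.1.toList.length)) := by
          by_cases hwl : e.1.toList = []
          · have hR : decide (i ∈ pvGS t e.1.toList 0) = false := decide_eq_false (by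
              intro hmem
              rw [hwl] at hmem
              rw [pvGS, dif_neg (by simp)] at hmem
              simp at hmem)
            rw [hR]
            by_cases hij : i ≤ j
            · have hb : decide (j < i + e.1.toList.length) = false := decide_eq_false (by
                rw [hwl]
                simp only [List.length_nil]
                omega)
              rw [hb]
              simp
            · have ha : decide (i ≤ j) = false := decide_eq_false hij
              rw [ha]
              simp
          · have hiR : i ∈ pvGS t e.1.toList 0 := (hre.2 hc).1 hwl
            have hp := List.isPrefixOf_iff_prefix.mp hc.2
            have hmlen : i + e.1.toList.length ≤ t.length := by
              have := hp.length_le; rw [List.length_drop] at this; omega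
            have hR : decide (i ∈ pvGS t e.1.toList 0) = true := decide_eq_true hiR
            rw [hR]
            by_cases h1 : j < i + e.1.toList.length
            · have h2 : decide (j < st.length) = true := decide_eq_true (by omega)
              rw [h2]
              simp
            · have h1' : decide (j < i + e.1.toList.length) = false := decide_eq_false h1
              rw [h1']
              simp
        rw [hhit, Bool.or_assoc]
      · intro x hx
        rcases List.mem_cons.mp hx with rfl | hx'
        · exact (hre.2 hc).2
        · exact hes3 x hx'
    · have hstep : pvBStep t i (st, out) e = (st, out ++ [e]) := by
        unfold pvBStep
        rw [if_neg hc]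
      rw [hstep]
      obtain ⟨ih1, ih2, es', hes1, hes2, hes3⟩ :=
        ih _ _ hlen (fun x hx => hrel x (by simp [hx]))
      refine ⟨ih1, ?_, ⟨e :: es', by rw [hes1]; simp, by simp [hes2], ?_⟩⟩
      · intro j
        rw [ih2 j]
        simp only [List.map_cons, List.any_cons]
        have h0 : decide (i ∈ pvGS t e.1.toList 0) = false := by
          simp only [decide_eq_false_iff_not]
          exact (hre.1 hc).1
        rw [h0]
        simp
      · intro x hx
        rcases List.mem_cons.mp hx with rfl | hx'
        · exact (hre.1 hc).2
        · exact hes3 x hx'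

def pvBLoop (t : List Char) (ws : List String) (i : Nat) : List Bool × List (String × Nat) :=
  (List.range i).foldl (fun st k => st.2.foldl (pvBStep t k) (st.1, []))
    (List.replicate t.length false, ws.map (fun w => (w, 0)))

lemma pvBOuter (t : List Char) (ws : List String) :
    ∀ (i : Nat), i ≤ t.length →
      (pvBLoop t ws i).1.length = t.length ∧
      (pvBLoop t ws i).2.map Prod.fst = ws ∧
      (∀ e ∈ (pvBLoop t ws i).2, pvRel t i e) ∧
      (∀ j, (pvBLoop t ws i).1.getD j false = pvPart t ws i j) := by
  intro i
  induction i with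
  | zero =>
    intro _
    refine ⟨by simp [pvBLoop], by simp [pvBLoop, Function.comp_def], ?_, ?_⟩
    · intro e he
      simp only [pvBLoop, List.range_zero, List.foldl_nil] at he
      obtain ⟨w, hw, rfl⟩ := List.mem_map.mp he
      unfold pvRel
      dsimp only
      rw [Nat.max_self, List.filter_eq_self.mpr (fun a _ => by simp)]
    · intro j
      have h1 : (pvBLoop t ws 0).1.getD j false = false := by
        simp only [pvBLoop, List.range_zero, List.foldl_nil]
        rw [List.getD_eq_getElem?_getD, List.getElem?_replicate]
        split <;> rfl
      rw [h1]
      have h2 : pvPart t ws 0 j = false := by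
        simp [pvPart]
      rw [h2]
  | succ i ih =>
    intro hi1
    obtain ⟨h1, h2, h3, h4⟩ := ih (by omega)
    have hloop : pvBLoop t ws (i + 1)
        = ((pvBLoop t ws i).2.foldl (pvBStep t i) ((pvBLoop t ws i).1, [])) := by
      unfold pvBLoop
      rw [List.range_succ, List.foldl_append, List.foldl_cons, List.foldl_nil]
    obtain ⟨g1, g2, es', ge1, ge2, ge3⟩ :=
      pvBInner_spec t i (by omega) (pvBLoop t ws i).2 (pvBLoop t ws i).1 [] h1 h3
    refine ⟨by rw [hloop]; exact g1, ?_, ?_, ?_⟩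
    · rw [hloop, ge1, List.nil_append, ge2, h2]
    · intro e he
      rw [hloop, ge1, List.nil_append] at he
      exact ge3 e he
    · intro j
      rw [hloop, g2 j, h4 j, h2]
      rw [Bool.eq_iff_iff]
      simp only [pvPart, Bool.or_eq_true, List.any_eq_true, Bool.and_eq_true, decide_eq_true_eq]
      constructor
      · rintro (⟨w, hwmem, q, hq, ⟨⟨hq1, hq2⟩, hq3⟩⟩ | ⟨w, hwmem, ⟨⟨hiq, hj1⟩, hj2⟩⟩)
        · exact ⟨w, hwmem, q, hq, ⟨⟨by omega, hq2⟩, hq3⟩⟩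
        · exact ⟨w, hwmem, i, hiq, ⟨⟨by omega, hj1⟩, hj2⟩⟩
      · rintro ⟨w, hwmem, q, hq, ⟨⟨hq1, hq2⟩, hq3⟩⟩
        by_cases hqi : q < i
        · exact Or.inl ⟨w, hwmem, q, hq, ⟨⟨hqi, hq2⟩, hq3⟩⟩
        · have : q = i := by omega
          subst this
          exact Or.inr ⟨w, hwmem, ⟨⟨hq, hq2⟩, hq3⟩⟩

lemma pvPart_top (t : List Char) (ws : List String) (j : Nat) :
    pvPart t ws t.length j = pvCovB t ws j := by
  rw [Bool.eq_iff_iff]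
  simp only [pvPart, pvCovB, List.any_eq_true, Bool.and_eq_true, decide_eq_true_eq]
  constructor
  · rintro ⟨w, hw, q, hq, ⟨⟨_, h2⟩, h3⟩⟩
    exact ⟨w, hw, q, hq, ⟨h2, h3⟩⟩
  · rintro ⟨w, hw, q, hq, ⟨h2, h3⟩⟩
    have hb := (pvGS_mem hq).2.2
    exact ⟨w, hw, q, hq, ⟨⟨by omega, h2⟩, h3⟩⟩

lemma pvB_eq (text : String) (highlights : List String) :
    build_char_styles_alt text highlights
      = (List.range text.toList.length).map
          (fun i => (String.ofList [text.toList.getD i ' '], pvCovB text.toList highlights i)) := by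
  obtain ⟨h1, h2, h3, h4⟩ := pvBOuter text.toList highlights text.toList.length le_rfl
  show (List.range text.toList.length).map
      (fun i => (String.ofList [text.toList.getD i ' '],
        (pvBLoop text.toList highlights text.toList.length).1.getD i false)) = _
  refine List.map_congr_left ?_
  intro j _
  rw [h4 j, pvPart_top]

lemma pvCovB_sorted (t : List Char) (ws : List String) (j : Nat) :
    pvCovB t (PySem.List.sorted ws (fun w => PySem.Str.len w) true) j = pvCovB t ws j := by
  rw [Bool.eq_iff_iff]
  simp only [pvCovB, List.any_eq_true]
  constructor
  · rintro ⟨w, hw, hrest⟩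
    exact ⟨w, (PySem.List.mem_sorted ws _ _ w).mp hw, hrest⟩
  · rintro ⟨w, hw, hrest⟩
    exact ⟨w, (PySem.List.mem_sorted ws _ _ w).mpr hw, hrest⟩

lemma pvA_eq (text : String) (highlights : List String) (ht : ¬ text.toList = [])
    (hh : ¬ highlights = []) (hne : ∀ w ∈ highlights, w.toList ≠ []) :
    build_char_styles text highlights
      = (List.range text.toList.length).map
          (fun i => (String.ofList [text.toList.getD i ' '], pvCovB text.toList highlights i)) := by
  have hne' : ∀ w ∈ PySem.List.sorted highlights (fun w => PySem.Str.len w) true, w.toList ≠ [] :=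
    fun w hw => hne w ((PySem.List.mem_sorted highlights _ _ w).mp hw)
  simp only [build_char_styles]
  rw [if_neg ht, if_neg hh]
  refine List.map_congr_left ?_
  intro j _
  rw [pvAFold_getD text.toList j _ _ hne' (by simp)]
  rw [show (List.replicate text.toList.length false).getD j false = false from by
    rw [List.getD_eq_getElem?_getD, List.getElem?_replicate]
    split <;> rfl]
  rw [Bool.false_or, pvCovB_sorted]

-- ===== VERDICT (by name: the statement is the Claim_ definition above) =====
theorem build_char_styles_spec : Claim_equal_build_char_styles := by
  intro text highlights _hd hpre
  unfold Spec_build_char_styles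
  rw [pvB_eq]
  by_cases ht : text.toList = []
  · have hA : build_char_styles text highlights = [] := by
      simp only [build_char_styles]
      rw [if_pos ht]
    rw [hA, ht]
    simp
  · by_cases hh : highlights = []
    · subst hh
      have hA : build_char_styles text [] = text.toList.map (fun c => (String.ofList [c], false)) := by
        simp only [build_char_styles]
        rw [if_neg ht, if_pos trivial]
      rw [hA]
      apply List.ext_getElem
      · simp
      · intro n h1 h2
        simp only [List.getElem_map, List.getElem_range]
        have hn : n < text.toList.length := by simpa using h1
        have e1 : text.toList.getD n ' ' = text.toList[n] := List.getD_eq_getElem _ _ hn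
        have e2 : pvCovB text.toList [] n = false := by simp [pvCovB]
        rw [e1, e2]
    · have hne : ∀ w ∈ highlights, w.toList ≠ [] := by
        rcases hpre with h | h
        · exact absurd h ht
        · exact h
      exact pvA_eq text highlights ht hh hne
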